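-- pv_equiv track=rewrite | github.com/Kam300/famalyone | face_recognition_server/pdf_server.py | sort_as_couples
-- ===== SOURCE A (Python) =====
-- def sort_as_couples(gen_members, all_members):
--     """Сортирует членов поколения парами (муж+жена рядом)"""
--     if len(gen_members) <= 1:
--         return gen_members
--
--     # Находим пары через общих детей
--     couples = find_couples(gen_members, all_members)
--
--     result = []
--     used_ids = set()
--
--     # Сначала добавляем пары
--     for m_id, f_id in couples:
--         male = next((m for m in gen_members if m.get('id') == m_id), None)
--         female = next((m for m in gen_members if m.get('id') == f_id), None)
--
--         if male and male.get('id') not in used_ids: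
--             result.append(male)
--             used_ids.add(male.get('id'))
--         if female and female.get('id') not in used_ids:
--             result.append(female)
--             used_ids.add(female.get('id'))
--
--     # Добавляем оставшихся (одиночек), сортируя мужчин перед женщинами
--     remaining = [m for m in gen_members if m.get('id') not in used_ids]
--     remaining.sort(key=lambda m: get_gender_order(m.get('role', 'OTHER')))
--     result.extend(remaining)
--
--     return result
--
-- def find_couples(gen_members, all_members):
--     """Находит пары (муж+жена) через общих детей"""
--     couples = []
--     member_ids = {m.get('id') for m in gen_members}
--
--     # Ищем детей, у которых оба родителя в этом поколении
--     for member in all_members: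
--         father_id = member.get('fatherId')
--         mother_id = member.get('motherId')
--
--         if father_id and mother_id:
--             if father_id in member_ids and mother_id in member_ids:
--                 couple = (father_id, mother_id)
--                 if couple not in couples:
--                     couples.append(couple)
--
--     # Если не нашли через детей, группируем по ролям (дедушка+бабушка, отец+мать)
--     if not couples:
--         males = [m for m in gen_members if get_gender_order(m.get('role', 'OTHER')) == 1]
--         females = [m for m in gen_members if get_gender_order(m.get('role', 'OTHER')) == 2]
--
--         # Создаём пары по порядку
--         for i, male in enumerate(males):
--             if i < len(females):
--                 couples.append((male.get('id'), females[i].get('id')))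
--
--     return couples
--
-- def get_gender_order(role):
--     """Возвращает порядок: 1 - мужской, 2 - женский, 3 - другое"""
--     male_roles = {'GRANDFATHER', 'FATHER', 'SON', 'BROTHER', 'UNCLE', 'NEPHEW', 'GRANDSON'}
--     female_roles = {'GRANDMOTHER', 'MOTHER', 'DAUGHTER', 'SISTER', 'AUNT', 'NIECE', 'GRANDDAUGHTER'}
--
--     if role in male_roles:
--         return 1
--     elif role in female_roles:
--         return 2
--     return 3
-- ===== SOURCE B (Python) =====
-- def sort_as_couples(gen_members, all_members):
--     """Couples first, then singles males/females/others.
--     One pass over gen_members places each coupled member directly into a slot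
--     indexed by a precomputed couple rank and distributes singles into three
--     gender buckets (a counting sort), instead of A's per-couple scans followed
--     by a comparison sort of the remainder."""
--     if len(gen_members) <= 1:
--         return gen_members
--
--     couples = find_couples(gen_members, all_members)
--
--     # rank: couple id -> position in the paired prefix (first appearance order)
--     rank = {}
--     for fid, mid in couples:
--         for cid in (fid, mid):
--             if cid not in rank:
--                 rank[cid] = len(rank)
--
--     slots = [None] * len(rank)
--     seen = set()
--     used = set()
--     males, females, others = [], [], []
--     for m in gen_members:
--         k = m.get('id')
--         if k in rank and k not in seen and m:
--             slots[rank[k]] = m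
--             used.add(k)
--         elif k not in used:
--             g = get_gender_order(m.get('role', 'OTHER'))
--             if g == 1:
--                 males.append(m)
--             elif g == 2:
--                 females.append(m)
--             else:
--                 others.append(m)
--         seen.add(k)
--
--     return [m for m in slots if m is not None] + males + females + others
--
--
-- def find_couples(gen_members, all_members):
--     couples = []
--     member_ids = {m.get('id') for m in gen_members}
--     for member in all_members:
--         father_id = member.get('fatherId')
--         mother_id = member.get('motherId')
--         if father_id and mother_id:
--             if father_id in member_ids and mother_id in member_ids:
--                 couple = (father_id, mother_id)
--                 if couple not in couples:
--                     couples.append(couple)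
--     if not couples:
--         males = [m for m in gen_members if get_gender_order(m.get('role', 'OTHER')) == 1]
--         females = [m for m in gen_members if get_gender_order(m.get('role', 'OTHER')) == 2]
--         for i, male in enumerate(males):
--             if i < len(females):
--                 couples.append((male.get('id'), females[i].get('id')))
--     return couples
--
--
-- def get_gender_order(role):
--     male_roles = {'GRANDFATHER', 'FATHER', 'SON', 'BROTHER', 'UNCLE', 'NEPHEW', 'GRANDSON'}
--     female_roles = {'GRANDMOTHER', 'MOTHER', 'DAUGHTER', 'SISTER', 'AUNT', 'NIECE', 'GRANDDAUGHTER'}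
--     if role in male_roles:
--         return 1
--     elif role in female_roles:
--         return 2
--     return 3
-- ===== Notes on version B (the rewrite author's own statement) =====
-- stated objective: alternative
-- what changed: B never builds the coupled prefix by walking couples with per-couple next() scans and never comparison-sorts the remainder: it precomputes a rank table from the couple ids, then makes ONE pass over gen_members, writing each first non-empty coupled member directly into a rank-indexed slot array and distributing every single into one of three gender buckets (a counting sort); the output is the compacted slots plus the concatenated buckets.
import Mathlib
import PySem

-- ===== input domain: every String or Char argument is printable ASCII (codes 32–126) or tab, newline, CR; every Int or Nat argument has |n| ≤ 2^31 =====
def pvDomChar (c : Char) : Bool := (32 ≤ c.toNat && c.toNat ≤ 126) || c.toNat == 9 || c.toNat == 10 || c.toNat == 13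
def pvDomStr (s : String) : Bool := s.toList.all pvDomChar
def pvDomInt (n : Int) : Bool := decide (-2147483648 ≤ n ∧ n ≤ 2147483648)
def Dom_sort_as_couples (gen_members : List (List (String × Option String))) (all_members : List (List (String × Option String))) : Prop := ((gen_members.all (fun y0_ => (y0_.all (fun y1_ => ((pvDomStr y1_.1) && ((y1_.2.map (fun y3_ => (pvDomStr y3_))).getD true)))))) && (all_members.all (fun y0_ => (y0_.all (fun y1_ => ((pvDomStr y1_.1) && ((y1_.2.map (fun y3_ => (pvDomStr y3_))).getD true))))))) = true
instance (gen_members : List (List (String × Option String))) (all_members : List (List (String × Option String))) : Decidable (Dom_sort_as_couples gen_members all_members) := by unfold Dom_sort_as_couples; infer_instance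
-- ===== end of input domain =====

-- B replaces A's per-couple scans plus comparison sort of the remainder by ONE pass over
-- gen_members that places each coupled member directly into a rank-indexed slot and
-- distributes the singles into three gender buckets (a counting sort). Objective: alternative.

-- ===== PORT A =====
-- m.get(k) on a member dict (values are Option String; missing key and value None both give none)
def pv_get (m : List (String × Option String)) (k : String) : Option String :=
  PySem.Dict.getD (PySem.Dict.mk m) k none

-- m.get('role', 'OTHER')
def pv_role (m : List (String × Option String)) : Option String :=
  PySem.Dict.getD (PySem.Dict.mk m) "role" (some "OTHER")

-- Python truthiness of an Option String value (None and '' are falsy)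
def pv_truthy (o : Option String) : Bool :=
  match o with
  | none => false
  | some s => !(s == "")

def get_gender_order (role : Option String) : Int :=
  let male_roles : PySem.Set String := PySem.Set.ofList ["GRANDFATHER", "FATHER", "SON", "BROTHER", "UNCLE", "NEPHEW", "GRANDSON"]
  let female_roles : PySem.Set String := PySem.Set.ofList ["GRANDMOTHER", "MOTHER", "DAUGHTER", "SISTER", "AUNT", "NIECE", "GRANDDAUGHTER"]
  match role with
  | some r =>
      if PySem.Set.contains male_roles r then 1
      else if PySem.Set.contains female_roles r then 2
      else 3
  | none => 3

def find_couples (gen_members : List (List (String × Option String))) (all_members : List (List (String × Option String))) : List (Option String × Option String) :=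
  let member_ids : PySem.Set (Option String) := PySem.Set.ofList (gen_members.map (fun m => pv_get m "id"))
  let couples := all_members.foldl (fun couples member =>
      let father_id := pv_get member "fatherId"
      let mother_id := pv_get member "motherId"
      if pv_truthy father_id && pv_truthy mother_id then
        if PySem.Set.contains member_ids father_id && PySem.Set.contains member_ids mother_id then
          let couple := (father_id, mother_id)
          if couples.contains couple then couples else couples ++ [couple]
        else couples
      else couples) []
  if couples.isEmpty then
    let males := gen_members.filter (fun m => get_gender_order (pv_role m) == 1)
    let females := gen_members.filter (fun m => get_gender_order (pv_role m) == 2)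
    (PySem.List.enumerate males 0).foldl (fun couples p =>
        if p.1 < (females.length : Int) then
          couples ++ [(pv_get p.2 "id", pv_get (PySem.List.pyGetD females p.1 []) "id")]
        else couples) couples
  else couples

def sort_as_couples (gen_members : List (List (String × Option String))) (all_members : List (List (String × Option String))) : List (List (String × Option String)) :=
  if gen_members.length ≤ 1 then gen_members
  else
    let couples := find_couples gen_members all_members
    let rs := couples.foldl (fun s c =>
        let male := gen_members.find? (fun m => pv_get m "id" == c.1)
        let female := gen_members.find? (fun m => pv_get m "id" == c.2)
        let s1 := match male with
          | some m =>
              if !m.isEmpty && !(PySem.Set.contains s.2 (pv_get m "id")) then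
                (s.1 ++ [m], PySem.Set.add s.2 (pv_get m "id"))
              else s
          | none => s
        match female with
        | some m =>
            if !m.isEmpty && !(PySem.Set.contains s1.2 (pv_get m "id")) then
              (s1.1 ++ [m], PySem.Set.add s1.2 (pv_get m "id"))
            else s1
        | none => s1)
      (([] : List (List (String × Option String))), (PySem.Set.empty : PySem.Set (Option String)))
    let remaining := gen_members.filter (fun m => !(PySem.Set.contains rs.2 (pv_get m "id")))
    let remaining := PySem.List.sorted remaining (fun m => get_gender_order (pv_role m)) false
    rs.1 ++ remaining

-- ===== PORT B =====
-- rank[cid] = len(rank) for each not-yet-seen couple id (B's rank table step)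
def rankStep (d : PySem.Dict (Option String) Int) (cid : Option String) : PySem.Dict (Option String) Int :=
  if PySem.Dict.contains d cid then d else PySem.Dict.insert d cid (PySem.Dict.size d : Int)

-- the loop state of B's single pass: slots (rank-indexed), seen/used id sets, three gender buckets
structure BSt where
  slots : List (Option (List (String × Option String)))
  seen : PySem.Set (Option String)
  used : PySem.Set (Option String)
  males : List (List (String × Option String))
  females : List (List (String × Option String))
  others : List (List (String × Option String))
deriving Repr, DecidableEq

-- the body of B's 'for m in gen_members' loop
def bStep (rank : PySem.Dict (Option String) Int) (s : BSt) (m : List (String × Option String)) : BSt :=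
  let k := pv_get m "id"
  let s' :=
    if PySem.Dict.contains rank k && !(PySem.Set.contains s.seen k) && !m.isEmpty then
      { s with slots := PySem.List.pySetD s.slots (PySem.Dict.getD rank k 0) (some m),
               used := PySem.Set.add s.used k }
    else if !(PySem.Set.contains s.used k) then
      let g := get_gender_order (pv_role m)
      if g == 1 then { s with males := s.males ++ [m] }
      else if g == 2 then { s with females := s.females ++ [m] }
      else { s with others := s.others ++ [m] }
    else s
  { s' with seen := PySem.Set.add s'.seen k }

def sort_as_couples_alt (gen_members : List (List (String × Option String))) (all_members : List (List (String × Option String))) : List (List (String × Option String)) :=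
  if gen_members.length ≤ 1 then gen_members
  else
    let couples := find_couples gen_members all_members
    let rank := couples.foldl (fun d c => [c.1, c.2].foldl rankStep d)
      (PySem.Dict.empty : PySem.Dict (Option String) Int)
    let st := gen_members.foldl (bStep rank)
      { slots := List.replicate (PySem.Dict.size rank) none,
        seen := (PySem.Set.empty : PySem.Set (Option String)),
        used := (PySem.Set.empty : PySem.Set (Option String)),
        males := [], females := [], others := [] }
    st.slots.filterMap id ++ st.males ++ st.females ++ st.others

-- ===== PRECONDITION & SPEC =====
def Spec_sort_as_couples (gen_members : List (List (String × Option String))) (all_members : List (List (String × Option String))) (out : List (List (String × Option String))) : Prop := out = sort_as_couples_alt gen_members all_members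
instance (gen_members : List (List (String × Option String))) (all_members : List (List (String × Option String))) (out : List (List (String × Option String))) : Decidable (Spec_sort_as_couples gen_members all_members out) := by unfold Spec_sort_as_couples; infer_instance

-- ===== CLAIM (what is proved, stated in full; the proofs are below) =====
def Claim_equal_sort_as_couples : Prop := ∀ (gen_members : List (List (String × Option String))) (all_members : List (List (String × Option String))), Dom_sort_as_couples gen_members all_members → Spec_sort_as_couples gen_members all_members (sort_as_couples gen_members all_members)

-- ===== LEMMAS AND PROOFS =====

-- first member of gen carrying id cid (A's next(...))
def pvFnd (gen : List (List (String × Option String))) (cid : Option String) : Option (List (String × Option String)) :=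
  gen.find? (fun m => pv_get m "id" == cid)

-- the member that gets appended for id cid, if any
def pvApp (gen : List (List (String × Option String))) (cid : Option String) : Option (List (String × Option String)) :=
  match pvFnd gen cid with
  | some m => if !m.isEmpty then some m else none
  | none => none

-- A's per-id step (with the used_ids check)
def pvStA (gen : List (List (String × Option String))) (s : List (List (String × Option String)) × PySem.Set (Option String)) (cid : Option String) : List (List (String × Option String)) × PySem.Set (Option String) :=
  match pvFnd gen cid with
  | some m =>
      if !m.isEmpty && !(PySem.Set.contains s.2 (pv_get m "id")) then
        (s.1 ++ [m], PySem.Set.add s.2 (pv_get m "id"))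
      else s
  | none => s

-- per-distinct-id step (no used check; dedup makes it unnecessary)
def pvStB (gen : List (List (String × Option String))) (s : List (List (String × Option String)) × PySem.Set (Option String)) (cid : Option String) : List (List (String × Option String)) × PySem.Set (Option String) :=
  match pvApp gen cid with
  | some m => (s.1 ++ [m], PySem.Set.add s.2 cid)
  | none => s

-- ordered dedup relative to an already-seen list
def pvDD (u : List (Option String)) : List (Option String) → List (Option String)
  | [] => []
  | x :: t => if u.contains x then pvDD u t else x :: pvDD (u ++ [x]) t

-- 'id(m) is not used' as A's remaining filter sees it, phrased against pvApp
def pvNU (gen : List (List (String × Option String))) (ids : List (Option String)) (m : List (String × Option String)) : Bool :=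
  !(decide (pv_get m "id" ∈ ids) && (pvApp gen (pv_get m "id")).isSome)

-- membership in one of B's three gender buckets
def pvBk (gen : List (List (String × Option String))) (ids : List (Option String)) (g : Int) (m : List (String × Option String)) : Bool :=
  (get_gender_order (pv_role m) == g) && pvNU gen ids m

-- the rank dict over a list of distinct ids
def rkOf (u : List (Option String)) : PySem.Dict (Option String) Int :=
  PySem.Dict.mk (u.zipIdx.map (fun p => (p.1, (p.2 : Int))))

theorem set_contains_eq {s : PySem.Set (Option String)} {k : Option String} : PySem.Set.contains s k = decide (k ∈ s) := by
  rw [PySem.Set.contains_eq_listContains]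
  by_cases h : k ∈ s <;> simp [h]

theorem pvFnd_id (gen : List (List (String × Option String))) (cid : Option String) (m : List (String × Option String)) (h : pvFnd gen cid = some m) : pv_get m "id" = cid := by
  have := List.find?_some h
  simpa using this

theorem pvFnd_eq_none_iff (p : List (List (String × Option String))) (k : Option String) : pvFnd p k = none ↔ k ∉ p.map (fun m => pv_get m "id") := by
  rw [pvFnd, List.find?_eq_none]
  constructor
  · intro h hk
    obtain ⟨m, hm, he⟩ := List.mem_map.mp hk
    exact h m hm (by simp [he])
  · intro h m hm hbe
    have he : pv_get m "id" = k := by simpa using hbe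
    exact h (he ▸ List.mem_map_of_mem hm)

theorem pvFnd_append_single (p : List (List (String × Option String))) (m : List (String × Option String)) (j : Option String) :
    pvFnd (p ++ [m]) j = (pvFnd p j).or (if pv_get m "id" == j then some m else none) := by
  rw [pvFnd, List.find?_append]
  congr 1
  cases hb : (pv_get m "id" == j) with
  | true => simp [List.find?, hb]
  | false => simp [List.find?, hb]

theorem pvApp_append_single_of_ne (p : List (List (String × Option String))) (m : List (String × Option String)) (j : Option String) (h : pv_get m "id" ≠ j) :
    pvApp (p ++ [m]) j = pvApp p j := by
  unfold pvApp
  rw [pvFnd_append_single]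
  have : (pv_get m "id" == j) = false := by simpa using h
  simp [this]

theorem pvApp_append_single_of_found (p : List (List (String × Option String))) (m : List (String × Option String)) (j : Option String) (h : (pvFnd p j).isSome = true) :
    pvApp (p ++ [m]) j = pvApp p j := by
  unfold pvApp
  rw [pvFnd_append_single]
  obtain ⟨x, hx⟩ := Option.isSome_iff_exists.mp h
  simp [hx]

theorem pvApp_append_single_new (p : List (List (String × Option String))) (m : List (String × Option String)) (hnone : pvFnd p (pv_get m "id") = none) :
    pvApp (p ++ [m]) (pv_get m "id") = if !m.isEmpty then some m else none := by
  unfold pvApp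
  rw [pvFnd_append_single, hnone]
  simp

theorem pvApp_prefix (p q : List (List (String × Option String))) (j : Option String) (h : (pvFnd p j).isSome = true) :
    pvApp (p ++ q) j = pvApp p j := by
  unfold pvApp pvFnd
  rw [List.find?_append]
  obtain ⟨x, hx⟩ := Option.isSome_iff_exists.mp h
  unfold pvFnd at hx
  simp [hx]

theorem pvStA_self (gen : List (List (String × Option String))) (s : List (List (String × Option String)) × PySem.Set (Option String)) (cid : Option String) (h : PySem.Set.contains s.2 cid = true ∨ pvApp gen cid = none) : pvStA gen s cid = s := by
  unfold pvStA
  cases hf : pvFnd gen cid with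
  | none => rfl
  | some m =>
    have hid := pvFnd_id gen cid m hf
    unfold pvApp at h
    rw [hf] at h
    show (if (!m.isEmpty && !(PySem.Set.contains s.2 (pv_get m "id"))) = true then (s.1 ++ [m], PySem.Set.add s.2 (pv_get m "id")) else s) = s
    rcases h with h | h
    · rw [hid, h]; simp
    · by_cases he : m.isEmpty
      · simp [he]
      · simp [he] at h

theorem pvStA_eq_stB (gen : List (List (String × Option String))) (s : List (List (String × Option String)) × PySem.Set (Option String)) (cid : Option String) (h : PySem.Set.contains s.2 cid = false) : pvStA gen s cid = pvStB gen s cid := by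
  unfold pvStA pvStB pvApp
  cases hf : pvFnd gen cid with
  | none => rfl
  | some m =>
    have hid := pvFnd_id gen cid m hf
    show (if (!m.isEmpty && !(PySem.Set.contains s.2 (pv_get m "id"))) = true then (s.1 ++ [m], PySem.Set.add s.2 (pv_get m "id")) else s)
      = (match (if !m.isEmpty then some m else none) with
         | some m => (s.1 ++ [m], PySem.Set.add s.2 cid)
         | none => s)
    rw [hid, h]
    by_cases he : m.isEmpty <;> simp [he]

theorem foldl_pairs_flat {σ : Type} (f : σ → Option String → σ) (l : List (Option String × Option String)) : ∀ s : σ, l.foldl (fun s c => f (f s c.1) c.2) s = (l.flatMap (fun c => [c.1, c.2])).foldl f s := by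
  induction l with
  | nil => intro s; rfl
  | cons c t ih => intro s; simp [List.flatMap_cons, ih]

theorem pv_ofList_DD (t : List (Option String)) : ∀ u : List (Option String), t.foldl PySem.Set.add u = u ++ pvDD u t := by
  induction t with
  | nil => intro u; simp [pvDD]
  | cons x t ih =>
    intro u
    simp only [List.foldl_cons, pvDD]
    by_cases hx : u.contains x = true
    · have : PySem.Set.add u x = u := by
        simp [List.contains_iff_mem.mp hx]
      rw [this, if_pos hx, ih u]
    · have hxm : x ∉ u := by simpa using hx
      have : PySem.Set.add u x = u ++ [x] := PySem.Set.add_of_not_mem hxm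
      rw [this, if_neg hx, ih (u ++ [x])]
      simp

theorem pv_dedup_DD (l : List (Option String)) : PySem.List.dedup l = pvDD [] l := by
  have h1 : PySem.List.dedup l = PySem.Set.ofList l := by simp
  rw [h1, PySem.Set.ofList_eq_foldl, pv_ofList_DD l []]
  simp

theorem pv_main (gen : List (List (String × Option String))) (t : List (Option String)) :
    ∀ (u : List (Option String)) (s : List (List (String × Option String)) × PySem.Set (Option String)),
      (∀ c, PySem.Set.contains s.2 c = true → u.contains c = true) →
      (∀ c, u.contains c = true → PySem.Set.contains s.2 c = true ∨ pvApp gen c = none) →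
      t.foldl (pvStA gen) s = (pvDD u t).foldl (pvStB gen) s := by
  induction t with
  | nil => intro u s _ _; rfl
  | cons c t ih =>
    intro u s h1 h2
    simp only [List.foldl_cons, pvDD]
    by_cases hu : u.contains c = true
    · rw [if_pos hu, pvStA_self gen s c (h2 c hu)]
      exact ih u s h1 h2
    · rw [if_neg hu]
      have hc : PySem.Set.contains s.2 c = false := by
        by_contra h
        exact hu (h1 c (by simpa using h))
      rw [pvStA_eq_stB gen s c hc]
      simp only [List.foldl_cons]
      refine ih (u ++ [c]) (pvStB gen s c) ?_ ?_
      · intro d hd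
        have hmem : d ∈ (pvStB gen s c).2 := by
          simpa [PySem.Set.contains_eq_listContains, List.contains_iff_mem] using hd
        have hcase : d ∈ s.2 ∨ d = c := by
          unfold pvStB at hmem
          cases ha : pvApp gen c with
          | none => rw [ha] at hmem; exact Or.inl hmem
          | some m =>
            rw [ha] at hmem
            exact (PySem.Set.mem_add s.2 c d).mp hmem
        rcases hcase with h | h
        · have := h1 d (by simpa [PySem.Set.contains_eq_listContains, List.contains_iff_mem] using h)
          simp only [List.contains_append, Bool.or_eq_true]
          exact Or.inl this
        · simp [h]
      · intro d hd
        simp only [List.contains_append, Bool.or_eq_true] at hd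
        rcases hd with hd | hd
        · rcases h2 d hd with h | h
          · left
            have hm : d ∈ s.2 := by simpa [PySem.Set.contains_eq_listContains, List.contains_iff_mem] using h
            have hgoal : d ∈ (pvStB gen s c).2 := by
              unfold pvStB
              cases ha : pvApp gen c with
              | none => exact hm
              | some m => exact (PySem.Set.mem_add s.2 c d).mpr (Or.inl hm)
            simpa [PySem.Set.contains_eq_listContains, List.contains_iff_mem] using hgoal
          · right; exact h
        · have hdc : d = c := by simpa using hd
          cases ha : pvApp gen c with
          | none => right; rw [hdc]; exact ha
          | some m =>
            left
            have hgoal : d ∈ (pvStB gen s c).2 := by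
              unfold pvStB
              rw [ha]
              exact (PySem.Set.mem_add s.2 c d).mpr (Or.inr hdc)
            simpa [PySem.Set.contains_eq_listContains, List.contains_iff_mem] using hgoal

theorem pvStB_fst (gen : List (List (String × Option String))) (l : List (Option String)) : ∀ acc, (l.foldl (pvStB gen) acc).1 = acc.1 ++ l.filterMap (pvApp gen) := by
  induction l with
  | nil => intro acc; simp
  | cons c t ih =>
    intro acc
    simp only [List.foldl_cons, List.filterMap_cons]
    cases ha : pvApp gen c with
    | none => simp [pvStB, ha, ih]
    | some m => simp [pvStB, ha, ih]

theorem pvStB_snd_mem (gen : List (List (String × Option String))) (l : List (Option String)) : ∀ acc (k : Option String), k ∈ (l.foldl (pvStB gen) acc).2 ↔ k ∈ acc.2 ∨ (k ∈ l ∧ (pvApp gen k).isSome = true) := by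
  induction l with
  | nil => intro acc k; simp
  | cons c t ih =>
    intro acc k
    simp only [List.foldl_cons]
    rw [ih]
    cases ha : pvApp gen c with
    | none =>
      simp only [pvStB, ha]
      constructor
      · rintro (h | h)
        · exact Or.inl h
        · exact Or.inr ⟨List.mem_cons_of_mem _ h.1, h.2⟩
      · rintro (h | ⟨hm, hs⟩)
        · exact Or.inl h
        · rcases List.mem_cons.mp hm with h | h
          · rw [h] at hs; rw [ha] at hs; simp at hs
          · exact Or.inr ⟨h, hs⟩
    | some m =>
      simp only [pvStB, ha]
      rw [PySem.Set.mem_add]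
      constructor
      · rintro ((h | h) | h)
        · exact Or.inl h
        · exact Or.inr ⟨by simp [h], by rw [h, ha]; rfl⟩
        · exact Or.inr ⟨List.mem_cons_of_mem _ h.1, h.2⟩
      · rintro (h | ⟨hm, hs⟩)
        · exact Or.inl (Or.inl h)
        · rcases List.mem_cons.mp hm with h | h
          · exact Or.inl (Or.inr h)
          · exact Or.inr ⟨h, hs⟩

theorem any_fst_zipIdx (u : List (Option String)) (k : Option String) : ∀ n : Nat, ((u.zipIdx n).map (fun p => ((p.1 : Option String), (p.2 : Int)))).any (fun p => p.1 == k) = u.contains k := by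
  induction u with
  | nil => intro n; rfl
  | cons a t ih =>
    intro n
    simp only [List.zipIdx_cons, List.map_cons, List.any_cons, ih]
    rw [List.contains_cons]
    congr 1
    by_cases h : a = k
    · simp [h]
    · simp [h]
      exact fun hh => h hh.symm

theorem contains_rkOf (u : List (Option String)) (k : Option String) : PySem.Dict.contains (rkOf u) k = u.contains k := by
  rw [rkOf, PySem.Dict.contains_mk]
  exact any_fst_zipIdx u k 0

theorem foldl_rankStep (l : List (Option String)) : ∀ u : List (Option String), l.foldl rankStep (rkOf u) = rkOf (u ++ pvDD u l) := by
  induction l with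
  | nil => intro u; simp [pvDD]
  | cons x t ih =>
    intro u
    simp only [List.foldl_cons, pvDD]
    by_cases hx : u.contains x = true
    · have h0 : rankStep (rkOf u) x = rkOf u := by
        rw [rankStep, contains_rkOf, hx]; rfl
      rw [h0, if_pos hx]; exact ih u
    · have hxf : u.contains x = false := by simpa using hx
      have h1 : rankStep (rkOf u) x = rkOf (u ++ [x]) := by
        rw [rankStep, contains_rkOf, hxf]
        simp only [Bool.false_eq_true, if_false]
        rw [PySem.Dict.insert]
        rw [show PySem.Dict.contains (rkOf u) x = false from (contains_rkOf u x).trans hxf]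
        simp only [Bool.false_eq_true, if_false]
        simp [rkOf, PySem.Dict.size, List.zipIdx_append]
      rw [h1, if_neg hx, ih (u ++ [x])]
      simp

theorem get?_rkOf_aux (u : List (Option String)) : ∀ (off i : Nat) (hi : i < u.length), u.Nodup →
    PySem.Dict.get? (PySem.Dict.mk ((u.zipIdx off).map (fun p => (p.1, (p.2 : Int))))) u[i] = some ((off + i : Nat) : Int) := by
  induction u with
  | nil => intro off i hi; simp at hi
  | cons a t ih =>
    intro off i hi hn
    simp only [List.zipIdx_cons, List.map_cons]
    rw [PySem.Dict.get?_mk_cons]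
    cases i with
    | zero => simp
    | succ j =>
      have hj : j < t.length := by simpa using hi
      have hne : (a == (a :: t)[j+1]) = false := by
        have : t[j] ∈ t := List.getElem_mem hj
        have : a ≠ t[j] := fun he => (List.nodup_cons.mp hn).1 (he ▸ this)
        simpa using this
      rw [hne]
      simp only [Bool.false_eq_true, if_false]
      have := ih (off+1) j hj (List.nodup_cons.mp hn).2
      simp only [List.getElem_cons_succ]
      rw [this]
      congr 1
      omega

theorem size_rkOf (u : List (Option String)) : PySem.Dict.size (rkOf u) = u.length := by
  simp [rkOf, PySem.Dict.size]

theorem getD_rkOf (u : List (Option String)) (i : Nat) (hi : i < u.length) (hn : u.Nodup) :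
    PySem.Dict.getD (rkOf u) u[i] 0 = (i : Int) := by
  rw [rkOf, PySem.Dict.getD]
  rw [show u.zipIdx = u.zipIdx 0 from rfl, get?_rkOf_aux u 0 i hi hn]
  simp

theorem gender_cases (r : Option String) : get_gender_order r = 1 ∨ get_gender_order r = 2 ∨ get_gender_order r = 3 := by
  cases r with
  | none => simp [get_gender_order]
  | some s => simp only [get_gender_order]; split_ifs <;> simp

theorem insertBy_append_not {α : Type} (before : α → α → Bool) (x : α) (ys zs : List α) (h : ∀ y ∈ ys, before x y = false) :
    PySem.List.insertBy before x (ys ++ zs) = ys ++ PySem.List.insertBy before x zs := by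
  induction ys with
  | nil => simp
  | cons y t ih =>
    have hy : before x y = false := h y (by simp)
    simp only [List.cons_append, PySem.List.insertBy, hy]
    simp only [Bool.false_eq_true, if_false]
    rw [ih (fun z hz => h z (by simp [hz]))]

theorem insertBy_cons_of_all {α : Type} (before : α → α → Bool) (x : α) (zs : List α) (h : ∀ z ∈ zs, before x z = true) :
    PySem.List.insertBy before x zs = x :: zs := by
  cases zs with
  | nil => rfl
  | cons z t => simp [PySem.List.insertBy, h z (by simp)]

theorem sort3 {α : Type} (l : List α) (key : α → Int) (h : ∀ x ∈ l, key x = 1 ∨ key x = 2 ∨ key x = 3) :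
    PySem.List.sorted l key false = l.filter (fun x => key x == 1) ++ l.filter (fun x => key x == 2) ++ l.filter (fun x => key x == 3) := by
  rw [PySem.List.sorted_eq_foldl_insertBy]
  induction l using List.reverseRecOn with
  | nil => rfl
  | append_singleton l x ih =>
    rw [List.foldl_append, List.foldl_cons, List.foldl_nil]
    rw [ih (fun y hy => h y (by simp [hy]))]
    have hmem1 : ∀ y ∈ l.filter (fun x => key x == 1), key y = 1 := by
      intro y hy; simpa using (List.of_mem_filter hy)
    have hmem2 : ∀ y ∈ l.filter (fun x => key x == 2), key y = 2 := by
      intro y hy; simpa using (List.of_mem_filter hy)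
    have hmem3 : ∀ y ∈ l.filter (fun x => key x == 3), key y = 3 := by
      intro y hy; simpa using (List.of_mem_filter hy)
    simp only [List.filter_append]
    rcases h x (by simp) with hx | hx | hx
    · -- key x = 1 : lands at end of bucket 1
      rw [List.append_assoc]
      rw [insertBy_append_not _ _ _ _ (by intro y hy; simp [hmem1 y hy, hx])]
      rw [insertBy_cons_of_all _ _ _ (by
        intro z hz
        rcases List.mem_append.mp hz with hz | hz
        · simp [hmem2 z hz, hx]
        · simp [hmem3 z hz, hx])]
      simp [hx]
    · rw [show l.filter (fun x => key x == 1) ++ l.filter (fun x => key x == 2) ++ l.filter (fun x => key x == 3)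
            = (l.filter (fun x => key x == 1) ++ l.filter (fun x => key x == 2)) ++ l.filter (fun x => key x == 3) by simp]
      rw [insertBy_append_not _ _ _ _ (by
        intro y hy
        rcases List.mem_append.mp hy with hy | hy
        · simp [hmem1 y hy, hx]
        · simp [hmem2 y hy, hx])]
      rw [insertBy_cons_of_all _ _ _ (by intro z hz; simp [hmem3 z hz, hx])]
      simp [hx]
    · rw [PySem.List.insertBy_of_forall_not_before _ _ _ (by
        intro y hy
        rcases List.mem_append.mp hy with hy | hy
        · rcases List.mem_append.mp hy with hy | hy
          · simp [hmem1 y hy, hx]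
          · simp [hmem2 y hy, hx]
        · simp [hmem3 y hy, hx])]
      simp [hx]

-- helper steps for the bucket invariants
theorem filt_app_false {α : Type} {q : α → Bool} {x : α} {a p : List α} (hx : q x = false) (h : a = p.filter q) : a = (p ++ [x]).filter q := by
  simp [List.filter_append, hx, h]

theorem filt_app_true {α : Type} {q : α → Bool} {x : α} {a p : List α} (hx : q x = true) (h : a = p.filter q) : a ++ [x] = (p ++ [x]).filter q := by
  simp [List.filter_append, hx, h]

theorem pvBk_of_used {gen : List (List (String × Option String))} {ids : List (Option String)} {m : List (String × Option String)} (g : Int) (hin : pv_get m "id" ∈ ids) (happ : (pvApp gen (pv_get m "id")).isSome = true) : pvBk gen ids g m = false := by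
  simp [pvBk, pvNU, hin, happ]

theorem pvBk_of_free {gen : List (List (String × Option String))} {ids : List (Option String)} {m : List (String × Option String)} (g : Int) (hNU : pvNU gen ids m = true) : pvBk gen ids g m = (get_gender_order (pv_role m) == g) := by
  simp [pvBk, hNU]

theorem seen_inv_step {se : PySem.Set (Option String)} {p : List (List (String × Option String))} (m : List (String × Option String)) (hseen : ∀ k, k ∈ se ↔ k ∈ p.map (fun m => pv_get m "id")) : ∀ k, k ∈ PySem.Set.add se (pv_get m "id") ↔ k ∈ (p ++ [m]).map (fun m => pv_get m "id") := by
  intro k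
  rw [PySem.Set.mem_add, hseen k]
  simp [or_comm]

-- B's one pass, characterized against the same pvApp/bucket functions as A's result
theorem bFold_main (gen : List (List (String × Option String))) (ids : List (Option String)) (hn : ids.Nodup) :
    ∀ (rest p : List (List (String × Option String))) (s : BSt),
      gen = p ++ rest →
      s.slots = ids.map (fun k => pvApp p k) →
      (∀ k, k ∈ s.seen ↔ k ∈ p.map (fun m => pv_get m "id")) →
      (∀ k, k ∈ s.used ↔ (k ∈ ids ∧ (pvApp p k).isSome = true)) →
      s.males = p.filter (pvBk gen ids 1) →
      s.females = p.filter (pvBk gen ids 2) →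
      s.others = p.filter (pvBk gen ids 3) →
      ((rest.foldl (bStep (rkOf ids)) s).slots = ids.map (fun k => pvApp gen k) ∧
       (rest.foldl (bStep (rkOf ids)) s).males = gen.filter (pvBk gen ids 1) ∧
       (rest.foldl (bStep (rkOf ids)) s).females = gen.filter (pvBk gen ids 2) ∧
       (rest.foldl (bStep (rkOf ids)) s).others = gen.filter (pvBk gen ids 3)) := by
  intro rest
  induction rest with
  | nil =>
    intro p s hgen hslots hseen hused hm hf ho
    have hp : p = gen := by rw [hgen, List.append_nil]
    subst hp
    simp only [List.foldl_nil]
    exact ⟨hslots, hm, hf, ho⟩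
  | cons m rest ih =>
    intro p s hgen hslots hseen hused hm hf ho
    rw [List.foldl_cons]
    have hgen' : gen = (p ++ [m]) ++ rest := by rw [hgen]; simp
    by_cases hin : pv_get m "id" ∈ ids
    · by_cases hsn : pv_get m "id" ∈ p.map (fun m => pv_get m "id")
      · -- id already occurs in p
        have hm0 : ∃ m0, pvFnd p (pv_get m "id") = some m0 := by
          rcases hfe : pvFnd p (pv_get m "id") with _ | m0
          · exact absurd ((pvFnd_eq_none_iff p _).mp hfe) (by simp [hsn])
          · exact ⟨m0, rfl⟩
        obtain ⟨m0, hm0⟩ := hm0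
        have hfsome : (pvFnd p (pv_get m "id")).isSome = true := by rw [hm0]; rfl
        have happ_pres : ∀ j, pvApp (p ++ [m]) j = pvApp p j := by
          intro j
          by_cases hj : pv_get m "id" = j
          · subst hj; exact pvApp_append_single_of_found p m _ hfsome
          · exact pvApp_append_single_of_ne p m j hj
        have happ_gen : pvApp gen (pv_get m "id") = pvApp p (pv_get m "id") := by
          rw [hgen]; exact pvApp_prefix p (m :: rest) _ hfsome
        have hseenT : PySem.Set.contains s.seen (pv_get m "id") = true := by
          rw [set_contains_eq]; simp [(hseen _).mpr hsn]
        have hcond : (PySem.Dict.contains (rkOf ids) (pv_get m "id") && !PySem.Set.contains s.seen (pv_get m "id") && !m.isEmpty) = false := by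
          rw [hseenT]; simp
        by_cases hbu : (pvApp p (pv_get m "id")).isSome = true
        · -- dropped: id already used
          have husedT : PySem.Set.contains s.used (pv_get m "id") = true := by
            rw [set_contains_eq]; simp [(hused _).mpr ⟨hin, hbu⟩]
          have hstep : bStep (rkOf ids) s m = { s with seen := PySem.Set.add s.seen (pv_get m "id") } := by
            simp only [bStep, hcond, husedT]; rfl
          rw [hstep]
          have happg : (pvApp gen (pv_get m "id")).isSome = true := by rw [happ_gen]; exact hbu
          refine ih (p ++ [m]) _ hgen' ?_ (seen_inv_step m hseen) ?_ ?_ ?_ ?_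
          · show s.slots = ids.map (fun k => pvApp (p ++ [m]) k)
            rw [hslots]; exact List.map_congr_left (fun j _ => (happ_pres j).symm)
          · intro k'
            show k' ∈ s.used ↔ _
            rw [hused k', happ_pres k']
          · exact filt_app_false (pvBk_of_used 1 hin happg) hm
          · exact filt_app_false (pvBk_of_used 2 hin happg) hf
          · exact filt_app_false (pvBk_of_used 3 hin happg) ho
        · -- bucket: first occurrence was an empty dict, id never used
          have hpnone : pvApp p (pv_get m "id") = none := by
            rcases hpa : pvApp p (pv_get m "id") with _ | v
            · rfl
            · exact absurd (by rw [hpa]; rfl) hbu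
          have husedF : PySem.Set.contains s.used (pv_get m "id") = false := by
            rw [set_contains_eq]
            simp only [decide_eq_false_iff_not]
            intro hc
            exact hbu ((hused _).mp hc).2
          have hNU : pvNU gen ids m = true := by
            simp [pvNU, happ_gen, hpnone]
          have hslots' : s.slots = ids.map (fun k => pvApp (p ++ [m]) k) := by
            rw [hslots]; exact List.map_congr_left (fun j _ => (happ_pres j).symm)
          have hused' : ∀ k', k' ∈ s.used ↔ (k' ∈ ids ∧ (pvApp (p ++ [m]) k').isSome = true) := by
            intro k'; rw [hused k', happ_pres k']
          rcases gender_cases (pv_role m) with hg | hg | hg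
          · have hstep : bStep (rkOf ids) s m = { s with males := s.males ++ [m], seen := PySem.Set.add s.seen (pv_get m "id") } := by
              simp only [bStep, hcond, husedF, hg]; rfl
            rw [hstep]
            refine ih (p ++ [m]) _ hgen' hslots' (seen_inv_step m hseen) hused' ?_ ?_ ?_
            · exact filt_app_true (by rw [pvBk_of_free 1 hNU, hg]; rfl) hm
            · exact filt_app_false (by rw [pvBk_of_free 2 hNU, hg]; rfl) hf
            · exact filt_app_false (by rw [pvBk_of_free 3 hNU, hg]; rfl) ho
          · have hstep : bStep (rkOf ids) s m = { s with females := s.females ++ [m], seen := PySem.Set.add s.seen (pv_get m "id") } := by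
              simp only [bStep, hcond, husedF, hg]; rfl
            rw [hstep]
            refine ih (p ++ [m]) _ hgen' hslots' (seen_inv_step m hseen) hused' ?_ ?_ ?_
            · exact filt_app_false (by rw [pvBk_of_free 1 hNU, hg]; rfl) hm
            · exact filt_app_true (by rw [pvBk_of_free 2 hNU, hg]; rfl) hf
            · exact filt_app_false (by rw [pvBk_of_free 3 hNU, hg]; rfl) ho
          · have hstep : bStep (rkOf ids) s m = { s with others := s.others ++ [m], seen := PySem.Set.add s.seen (pv_get m "id") } := by
              simp only [bStep, hcond, husedF, hg]; rfl
            rw [hstep]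
            refine ih (p ++ [m]) _ hgen' hslots' (seen_inv_step m hseen) hused' ?_ ?_ ?_
            · exact filt_app_false (by rw [pvBk_of_free 1 hNU, hg]; rfl) hm
            · exact filt_app_false (by rw [pvBk_of_free 2 hNU, hg]; rfl) hf
            · exact filt_app_true (by rw [pvBk_of_free 3 hNU, hg]; rfl) ho
      · -- first occurrence of this id
        have hfnone : pvFnd p (pv_get m "id") = none := (pvFnd_eq_none_iff p _).mpr hsn
        have hseenF : PySem.Set.contains s.seen (pv_get m "id") = false := by
          rw [set_contains_eq]
          simp only [decide_eq_false_iff_not]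
          intro hc
          exact hsn ((hseen _).mp hc)
        have husedF : PySem.Set.contains s.used (pv_get m "id") = false := by
          rw [set_contains_eq]
          simp only [decide_eq_false_iff_not]
          intro hc
          have := ((hused _).mp hc).2
          rw [show pvApp p (pv_get m "id") = none by unfold pvApp; rw [hfnone]] at this
          simp at this
        have hidsT : ids.contains (pv_get m "id") = true := List.contains_iff_mem.mpr hin
        have happ_new : pvApp (p ++ [m]) (pv_get m "id") = if !m.isEmpty then some m else none :=
          pvApp_append_single_new p m hfnone
        have hfsome' : (pvFnd (p ++ [m]) (pv_get m "id")).isSome = true := by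
          rw [pvFnd_append_single, hfnone]
          simp
        have happ_gen : pvApp gen (pv_get m "id") = pvApp (p ++ [m]) (pv_get m "id") := by
          rw [hgen']; exact pvApp_prefix (p ++ [m]) rest _ hfsome'
        by_cases hemp : m.isEmpty = true
        · -- empty member: cannot be appended as a couple member, goes to a bucket
          have hcond : (PySem.Dict.contains (rkOf ids) (pv_get m "id") && !PySem.Set.contains s.seen (pv_get m "id") && !m.isEmpty) = false := by
            rw [hemp]; simp
          have happ_none : pvApp (p ++ [m]) (pv_get m "id") = none := by rw [happ_new, hemp]; rfl
          have happ_pres : ∀ j, pvApp (p ++ [m]) j = pvApp p j := by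
            intro j
            by_cases hj : pv_get m "id" = j
            · subst hj
              rw [happ_none]
              unfold pvApp
              rw [hfnone]
            · exact pvApp_append_single_of_ne p m j hj
          have hNU : pvNU gen ids m = true := by
            simp [pvNU, happ_gen, happ_none]
          have hslots' : s.slots = ids.map (fun k => pvApp (p ++ [m]) k) := by
            rw [hslots]; exact List.map_congr_left (fun j _ => (happ_pres j).symm)
          have hused' : ∀ k', k' ∈ s.used ↔ (k' ∈ ids ∧ (pvApp (p ++ [m]) k').isSome = true) := by
            intro k'; rw [hused k', happ_pres k']
          rcases gender_cases (pv_role m) with hg | hg | hg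
          · have hstep : bStep (rkOf ids) s m = { s with males := s.males ++ [m], seen := PySem.Set.add s.seen (pv_get m "id") } := by
              simp only [bStep, hcond, husedF, hg]; rfl
            rw [hstep]
            refine ih (p ++ [m]) _ hgen' hslots' (seen_inv_step m hseen) hused' ?_ ?_ ?_
            · exact filt_app_true (by rw [pvBk_of_free 1 hNU, hg]; rfl) hm
            · exact filt_app_false (by rw [pvBk_of_free 2 hNU, hg]; rfl) hf
            · exact filt_app_false (by rw [pvBk_of_free 3 hNU, hg]; rfl) ho
          · have hstep : bStep (rkOf ids) s m = { s with females := s.females ++ [m], seen := PySem.Set.add s.seen (pv_get m "id") } := by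
              simp only [bStep, hcond, husedF, hg]; rfl
            rw [hstep]
            refine ih (p ++ [m]) _ hgen' hslots' (seen_inv_step m hseen) hused' ?_ ?_ ?_
            · exact filt_app_false (by rw [pvBk_of_free 1 hNU, hg]; rfl) hm
            · exact filt_app_true (by rw [pvBk_of_free 2 hNU, hg]; rfl) hf
            · exact filt_app_false (by rw [pvBk_of_free 3 hNU, hg]; rfl) ho
          · have hstep : bStep (rkOf ids) s m = { s with others := s.others ++ [m], seen := PySem.Set.add s.seen (pv_get m "id") } := by
              simp only [bStep, hcond, husedF, hg]; rfl
            rw [hstep]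
            refine ih (p ++ [m]) _ hgen' hslots' (seen_inv_step m hseen) hused' ?_ ?_ ?_
            · exact filt_app_false (by rw [pvBk_of_free 1 hNU, hg]; rfl) hm
            · exact filt_app_false (by rw [pvBk_of_free 2 hNU, hg]; rfl) hf
            · exact filt_app_true (by rw [pvBk_of_free 3 hNU, hg]; rfl) ho
        · -- the couple-member slot case
          have hempF : m.isEmpty = false := by simpa using hemp
          have hcond : (PySem.Dict.contains (rkOf ids) (pv_get m "id") && !PySem.Set.contains s.seen (pv_get m "id") && !m.isEmpty) = true := by
            rw [contains_rkOf, hidsT, hseenF, hempF]; rfl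
          have hstep : bStep (rkOf ids) s m = { s with
              slots := PySem.List.pySetD s.slots (PySem.Dict.getD (rkOf ids) (pv_get m "id") 0) (some m),
              used := PySem.Set.add s.used (pv_get m "id"),
              seen := PySem.Set.add s.seen (pv_get m "id") } := by
            simp only [bStep, hcond]; rfl
          rw [hstep]
          have happ_some : pvApp (p ++ [m]) (pv_get m "id") = some m := by rw [happ_new, hempF]; rfl
          obtain ⟨i, hi, hik⟩ := List.getElem_of_mem hin
          have hslots' : PySem.List.pySetD s.slots (PySem.Dict.getD (rkOf ids) (pv_get m "id") 0) (some m) = ids.map (fun k => pvApp (p ++ [m]) k) := by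
            rw [← hik, getD_rkOf ids i hi hn, hslots, PySem.List.pySetD_natCast]
            apply List.ext_getElem
            · simp
            · intro j hj1 hj2
              rw [List.getElem_set]
              simp only [List.getElem_map]
              have hj : j < ids.length := by simpa using hj2
              by_cases hij : i = j
              · subst hij
                rw [if_pos rfl, hik, happ_some]
              · rw [if_neg hij]
                have hne : ids[j] ≠ ids[i] := by
                  intro he
                  exact hij ((List.Nodup.getElem_inj_iff hn).mp he).symm
                rw [hik] at hne
                rw [pvApp_append_single_of_ne p m _ (fun hh => hne hh.symm)]
          refine ih (p ++ [m]) _ hgen' hslots' (seen_inv_step m hseen) ?_ ?_ ?_ ?_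
          · intro k'
            show k' ∈ PySem.Set.add s.used (pv_get m "id") ↔ _
            rw [PySem.Set.mem_add, hused k']
            by_cases hk' : k' = pv_get m "id"
            · subst hk'
              simp [hin, happ_some]
            · rw [pvApp_append_single_of_ne p m _ (fun hh => hk' hh.symm)]
              simp [hk']
          · exact filt_app_false (pvBk_of_used 1 hin (by rw [happ_gen, happ_some]; rfl)) hm
          · exact filt_app_false (pvBk_of_used 2 hin (by rw [happ_gen, happ_some]; rfl)) hf
          · exact filt_app_false (pvBk_of_used 3 hin (by rw [happ_gen, happ_some]; rfl)) ho
    · -- id not a couple id at all: always a bucket member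
      have hidsF : ids.contains (pv_get m "id") = false := by
        by_contra hc
        exact hin (List.contains_iff_mem.mp (by simpa using hc))
      have hcond : (PySem.Dict.contains (rkOf ids) (pv_get m "id") && !PySem.Set.contains s.seen (pv_get m "id") && !m.isEmpty) = false := by
        rw [contains_rkOf, hidsF]; rfl
      have husedF : PySem.Set.contains s.used (pv_get m "id") = false := by
        rw [set_contains_eq]
        simp only [decide_eq_false_iff_not]
        intro hc
        exact hin ((hused _).mp hc).1
      have happ_pres : ∀ j, j ∈ ids → pvApp (p ++ [m]) j = pvApp p j := by
        intro j hj
        exact pvApp_append_single_of_ne p m j (fun hh => hin (hh ▸ hj))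
      have hNU : pvNU gen ids m = true := by
        simp [pvNU, hin]
      have hslots' : s.slots = ids.map (fun k => pvApp (p ++ [m]) k) := by
        rw [hslots]; exact List.map_congr_left (fun j hj => (happ_pres j hj).symm)
      have hused' : ∀ k', k' ∈ s.used ↔ (k' ∈ ids ∧ (pvApp (p ++ [m]) k').isSome = true) := by
        intro k'
        rw [hused k']
        by_cases hk' : k' ∈ ids
        · rw [happ_pres k' hk']
        · simp [hk']
      rcases gender_cases (pv_role m) with hg | hg | hg
      · have hstep : bStep (rkOf ids) s m = { s with males := s.males ++ [m], seen := PySem.Set.add s.seen (pv_get m "id") } := by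
          simp only [bStep, hcond, husedF, hg]; rfl
        rw [hstep]
        refine ih (p ++ [m]) _ hgen' hslots' (seen_inv_step m hseen) hused' ?_ ?_ ?_
        · exact filt_app_true (by rw [pvBk_of_free 1 hNU, hg]; rfl) hm
        · exact filt_app_false (by rw [pvBk_of_free 2 hNU, hg]; rfl) hf
        · exact filt_app_false (by rw [pvBk_of_free 3 hNU, hg]; rfl) ho
      · have hstep : bStep (rkOf ids) s m = { s with females := s.females ++ [m], seen := PySem.Set.add s.seen (pv_get m "id") } := by
          simp only [bStep, hcond, husedF, hg]; rfl
        rw [hstep]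
        refine ih (p ++ [m]) _ hgen' hslots' (seen_inv_step m hseen) hused' ?_ ?_ ?_
        · exact filt_app_false (by rw [pvBk_of_free 1 hNU, hg]; rfl) hm
        · exact filt_app_true (by rw [pvBk_of_free 2 hNU, hg]; rfl) hf
        · exact filt_app_false (by rw [pvBk_of_free 3 hNU, hg]; rfl) ho
      · have hstep : bStep (rkOf ids) s m = { s with others := s.others ++ [m], seen := PySem.Set.add s.seen (pv_get m "id") } := by
          simp only [bStep, hcond, husedF, hg]; rfl
        rw [hstep]
        refine ih (p ++ [m]) _ hgen' hslots' (seen_inv_step m hseen) hused' ?_ ?_ ?_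
        · exact filt_app_false (by rw [pvBk_of_free 1 hNU, hg]; rfl) hm
        · exact filt_app_false (by rw [pvBk_of_free 2 hNU, hg]; rfl) hf
        · exact filt_app_true (by rw [pvBk_of_free 3 hNU, hg]; rfl) ho

theorem sort_as_couples_eq (gen_members : List (List (String × Option String))) (all_members : List (List (String × Option String))) : sort_as_couples gen_members all_members = sort_as_couples_alt gen_members all_members := by
  unfold sort_as_couples sort_as_couples_alt
  by_cases hlen : gen_members.length ≤ 1
  · simp [hlen]
  · rw [if_neg hlen, if_neg hlen]
    simp only []
    set couples := find_couples gen_members all_members with hcpl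
    set flat := couples.flatMap (fun c => [c.1, c.2]) with hflat
    set ids := PySem.List.dedup flat with hids
    set init : List (List (String × Option String)) × PySem.Set (Option String) :=
      (([] : List (List (String × Option String))), (PySem.Set.empty : PySem.Set (Option String))) with hinit
    have hnodup : ids.Nodup := PySem.List.nodup_dedup flat
    -- A's couple loop is the per-distinct-id loop
    have hA : couples.foldl (fun s c =>
        let male := gen_members.find? (fun m => pv_get m "id" == c.1)
        let female := gen_members.find? (fun m => pv_get m "id" == c.2)
        let s1 := match male with
          | some m =>
              if !m.isEmpty && !(PySem.Set.contains s.2 (pv_get m "id")) then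
                (s.1 ++ [m], PySem.Set.add s.2 (pv_get m "id"))
              else s
          | none => s
        match female with
        | some m =>
            if !m.isEmpty && !(PySem.Set.contains s1.2 (pv_get m "id")) then
              (s1.1 ++ [m], PySem.Set.add s1.2 (pv_get m "id"))
            else s1
        | none => s1) init
        = ids.foldl (pvStB gen_members) init := by
      have h1 : couples.foldl (fun s c => pvStA gen_members (pvStA gen_members s c.1) c.2) init
          = flat.foldl (pvStA gen_members) init := foldl_pairs_flat (pvStA gen_members) couples init
      have h2 : flat.foldl (pvStA gen_members) init = (pvDD [] flat).foldl (pvStB gen_members) init := by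
        refine pv_main gen_members flat [] init ?_ ?_
        · intro c h; simp [hinit] at h
        · intro c h; simp at h
      rw [← pv_dedup_DD] at h2
      rw [← hids] at h2
      show List.foldl (fun s c => pvStA gen_members (pvStA gen_members s c.1) c.2) init couples = _
      rw [h1, h2]
    -- B's rank table is rkOf ids
    have hrank : couples.foldl (fun d c => [c.1, c.2].foldl rankStep d)
        (PySem.Dict.empty : PySem.Dict (Option String) Int) = rkOf ids := by
      have h1 : couples.foldl (fun d c => rankStep (rankStep d c.1) c.2)
          (PySem.Dict.empty : PySem.Dict (Option String) Int)
          = flat.foldl rankStep (PySem.Dict.empty : PySem.Dict (Option String) Int) :=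
        foldl_pairs_flat rankStep couples _
      have h2 : flat.foldl rankStep (rkOf []) = rkOf ([] ++ pvDD [] flat) := foldl_rankStep flat []
      show List.foldl (fun d c => rankStep (rankStep d c.1) c.2) (PySem.Dict.empty : PySem.Dict (Option String) Int) couples = _
      rw [h1]
      rw [show (PySem.Dict.empty : PySem.Dict (Option String) Int) = rkOf [] from rfl, h2]
      rw [List.nil_append, ← pv_dedup_DD, ← hids]
    rw [hrank]
    -- B's single pass, characterized
    have hmain := bFold_main gen_members ids hnodup gen_members []
      { slots := List.replicate (PySem.Dict.size (rkOf ids)) none,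
        seen := (PySem.Set.empty : PySem.Set (Option String)),
        used := (PySem.Set.empty : PySem.Set (Option String)),
        males := [], females := [], others := [] }
      (by simp)
      (by
        show List.replicate (PySem.Dict.size (rkOf ids)) none = ids.map (fun k => pvApp [] k)
        rw [size_rkOf]
        rw [show (fun k => pvApp ([] : List (List (String × Option String))) k) = (fun _ => (none : Option (List (String × Option String)))) from rfl]
        rw [List.map_const'])
      (by intro k; simp [PySem.Set.empty])
      (by intro k; simp [PySem.Set.empty, pvApp, pvFnd])
      (by simp) (by simp) (by simp)
    obtain ⟨hslots, hmales, hfemales, hothers⟩ := hmain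
    rw [hslots, hmales, hfemales, hothers, hA]
    -- A's coupled prefix = B's compacted slots
    have hcoupled : (ids.foldl (pvStB gen_members) init).1 = (ids.map (fun k => pvApp gen_members k)).filterMap id := by
      rw [pvStB_fst, List.filterMap_map]
      simp [hinit, Function.comp]
    rw [hcoupled]
    -- A's remaining filter is the not-used predicate
    have hfilt : gen_members.filter (fun m => !(PySem.Set.contains (ids.foldl (pvStB gen_members) init).2 (pv_get m "id"))) = gen_members.filter (pvNU gen_members ids) := by
      apply List.filter_congr
      intro m _
      rw [set_contains_eq]
      unfold pvNU
      by_cases h1 : pv_get m "id" ∈ ids <;>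
        by_cases h2 : (pvApp gen_members (pv_get m "id")).isSome = true <;>
          simp [pvStB_snd_mem, hinit, h1, h2, PySem.Set.empty]
    rw [hfilt]
    -- A's gender sort of the remainder = B's three buckets
    have hsort : PySem.List.sorted (gen_members.filter (pvNU gen_members ids)) (fun m => get_gender_order (pv_role m)) false
        = gen_members.filter (pvBk gen_members ids 1) ++ gen_members.filter (pvBk gen_members ids 2) ++ gen_members.filter (pvBk gen_members ids 3) := by
      rw [sort3 _ _ (fun x _ => gender_cases (pv_role x))]
      rw [List.filter_filter, List.filter_filter, List.filter_filter]
      rfl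
    rw [hsort]
    simp [List.append_assoc]

-- ===== VERDICT (by name: the statement is the Claim_ definition above) =====
theorem sort_as_couples_spec : Claim_equal_sort_as_couples := by
  intro gen_members all_members _
  unfold Spec_sort_as_couples
  exact sort_as_couples_eq gen_members all_members
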